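-- pv_equiv track=rewrite | github.com/killerloop85/ios-routing | scripts/update_routing_lists.py | find_parent_conflicts
-- ===== SOURCE A (Python) =====
-- from typing import Dict, Iterable, List, Sequence, Set
--
-- def find_parent_conflicts(domains: Iterable[str]) -> list[tuple[str, str]]:
--     ordered = sorted(set(domains), key=lambda item: (item.count("."), item))
--     conflicts: list[tuple[str, str]] = []
--     parents: list[str] = []
--     for domain in ordered:
--         for parent in parents:
--             if domain.endswith("." + parent):
--                 conflicts.append((parent, domain))
--                 break
--         parents.append(domain)
--     return conflicts
-- ===== SOURCE B (Python) =====
-- def find_parent_conflicts(domains):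
--     registered = set(domains)
--     ordered = sorted(registered, key=lambda item: (item.count("."), item))
--     conflicts = []
--     for domain in ordered:
--         # scan '.' positions right-to-left: the topmost registered ancestor is found first
--         for i in range(len(domain) - 1, -1, -1):
--             if domain[i] == "." and domain[i + 1:] in registered:
--                 conflicts.append((domain[i + 1:], domain))
--                 break
--     return conflicts
-- ===== Notes on version B (the rewrite author's own statement) =====
-- stated objective: faster
-- what changed: Instead of scanning all previously emitted parents for each domain (quadratic pair scan), B enumerates each domain's own dot positions right-to-left and tests each label-suffix for membership in a hash set of the registered domains, so the topmost registered ancestor is found without any cross-domain scan.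
import Mathlib
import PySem

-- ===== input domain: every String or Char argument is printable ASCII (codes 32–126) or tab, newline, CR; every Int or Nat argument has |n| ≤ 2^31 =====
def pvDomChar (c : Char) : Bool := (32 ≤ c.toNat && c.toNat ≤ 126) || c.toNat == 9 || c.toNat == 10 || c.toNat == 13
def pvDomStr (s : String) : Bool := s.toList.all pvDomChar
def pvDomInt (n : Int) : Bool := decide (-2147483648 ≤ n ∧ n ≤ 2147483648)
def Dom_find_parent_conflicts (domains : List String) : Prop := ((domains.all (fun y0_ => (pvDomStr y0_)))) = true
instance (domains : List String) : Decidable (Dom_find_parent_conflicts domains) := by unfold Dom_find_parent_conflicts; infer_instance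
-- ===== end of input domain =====

-- B replaces A's quadratic scan of previously emitted parents by a per-domain walk over the
-- domain's own dot positions (right to left) with a set-membership test of each label-suffix.

-- ===== PORT A =====
-- inner 'for parent in parents: if domain.endswith("." + parent): …; break'
def pvFirstParent (domain : String) : List String → Option String
  | [] => none
  | p :: ps =>
    if PySem.Str.endswith domain ("." ++ p) then some p else pvFirstParent domain ps

def find_parent_conflicts (domains : List String) : List (String × String) :=
  let ordered := PySem.List.sorted2 (PySem.Set.ofList domains)
    (fun item => PySem.Str.count item ".") (fun item => item)
  (ordered.foldl (fun (st : List (String × String) × List String) domain =>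
      match pvFirstParent domain st.2 with
      | some p => (st.1 ++ [(p, domain)], st.2 ++ [domain])
      | none => (st.1, st.2 ++ [domain])) (([], []) : List (String × String) × List String)).1

-- ===== PORT B =====
-- inner 'for i in range(len(domain)-1, -1, -1): if domain[i] == "." and domain[i+1:] in registered: …; break'
def pvScan (registered : List String) (domain : String) : List Int → Option String
  | [] => none
  | i :: rest =>
    if PySem.Str.pyGet? domain i == some '.'
        && PySem.Set.contains registered (PySem.Str.slice domain (some (i + 1)) none) then
      some (PySem.Str.slice domain (some (i + 1)) none)
    else pvScan registered domain rest

def find_parent_conflicts_alt (domains : List String) : List (String × String) :=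
  let registered := PySem.Set.ofList domains
  let ordered := PySem.List.sorted2 registered
    (fun item => PySem.Str.count item ".") (fun item => item)
  ordered.foldl (fun conflicts domain =>
    match pvScan registered domain
        (PySem.List.pyRange (PySem.Str.len domain - 1) (-1) (-1)) with
    | some cand => conflicts ++ [(cand, domain)]
    | none => conflicts) []

-- ===== PRECONDITION & SPEC =====
def Spec_find_parent_conflicts (domains : List String) (out : List (String × String)) : Prop := out = find_parent_conflicts_alt domains
instance (domains : List String) (out : List (String × String)) : Decidable (Spec_find_parent_conflicts domains out) := by unfold Spec_find_parent_conflicts; infer_instance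

-- ===== CLAIM (what is proved, stated in full; the proofs are below) =====
def Claim_equal_find_parent_conflicts : Prop := ∀ (domains : List String), Dom_find_parent_conflicts domains → Spec_find_parent_conflicts domains (find_parent_conflicts domains)

-- ===== LEMMAS AND PROOFS =====

-- the dot-count key and the strict lexicographic comparison sorted2 uses
def pvKeyC (s : String) : Nat := PySem.Str.count s "."
def pvLt (a b : String) : Bool :=
  decide (pvKeyC a < pvKeyC b) || (!decide (pvKeyC b < pvKeyC a) && decide (a < b))
def pvOrdered (domains : List String) : List String :=
  PySem.List.sorted2 (PySem.Set.ofList domains)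
    (fun item => PySem.Str.count item ".") (fun item => item)

-- pvFirstParent is find? over the parents list
theorem pvFirstParent_eq_find? (d : String) (P : List String) :
    pvFirstParent d P = P.find? (fun p => PySem.Str.endswith d ("." ++ p)) := by
  induction P with
  | nil => rfl
  | cons p ps ih =>
    by_cases h : PySem.Str.endswith d ("." ++ p) = true
    · simp only [pvFirstParent, List.find?_cons, h]
      simp
    · have h' : PySem.Str.endswith d ("." ++ p) = false := by simpa using h
      simp only [pvFirstParent, List.find?_cons, h', ih]
      simp

-- pvScan is find? over the index list, mapped through the slice
theorem pvScan_eq_find? (S : List String) (d : String) (R : List Int) :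
    pvScan S d R = (R.find? (fun i => PySem.Str.pyGet? d i == some '.'
        && PySem.Set.contains S (PySem.Str.slice d (some (i + 1)) none))).map
      (fun i => PySem.Str.slice d (some (i + 1)) none) := by
  induction R with
  | nil => rfl
  | cons i rest ih =>
    by_cases h : (PySem.Str.pyGet? d i == some '.'
        && PySem.Set.contains S (PySem.Str.slice d (some (i + 1)) none)) = true
    · simp only [pvScan, List.find?_cons, h, Option.map_some]
      simp
    · have h' : (PySem.Str.pyGet? d i == some '.'
          && PySem.Set.contains S (PySem.Str.slice d (some (i + 1)) none)) = false := by
        simpa using h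
      simp only [pvScan, List.find?_cons, h', ih]
      simp

-- first satisfier of a pairwise-ordered list, characterised
theorem find?_eq_some_of_pairwise {α : Type} (R : α → α → Prop) (M : α → Bool)
    (P : List α) (hpair : P.Pairwise R) (c : α) (hc : c ∈ P) (hM : M c = true)
    (hmin : ∀ p ∈ P, M p = true → p ≠ c → ¬ R p c) :
    P.find? M = some c := by
  induction P with
  | nil => cases hc
  | cons h t ih =>
    rw [List.pairwise_cons] at hpair
    rw [List.mem_cons] at hc
    by_cases hMh : M h = true
    · have hhc : h = c := by
        by_contra hne
        have hct : c ∈ t := hc.resolve_left (fun h' => hne h'.symm)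
        exact hmin h (List.mem_cons_self ..) hMh hne (hpair.1 c hct)
      subst hhc
      exact List.find?_cons_of_pos hMh
    · have hne : h ≠ c := fun he => hMh (he ▸ hM)
      have hct : c ∈ t := hc.resolve_left (fun h' => hne h'.symm)
      rw [List.find?_cons_of_neg hMh]
      exact ih hpair.2 hct (fun p hp hMp hpc => hmin p (List.mem_cons_of_mem _ hp) hMp hpc)

-- a descending list's find? returns the greatest satisfier
theorem find?_some_desc (M : Int → Bool) (l : List Int)
    (hpair : l.Pairwise (fun a b => b < a)) (x : Int) (hfind : l.find? M = some x) :
    M x = true ∧ x ∈ l ∧ ∀ j ∈ l, M j = true → j ≤ x := by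
  induction l with
  | nil => cases hfind
  | cons h t ih =>
    rw [List.pairwise_cons] at hpair
    by_cases hMh : M h = true
    · rw [List.find?_cons_of_pos hMh] at hfind
      obtain rfl : h = x := Option.some.inj hfind
      refine ⟨hMh, List.mem_cons_self .., ?_⟩
      intro j hj _
      rcases List.mem_cons.mp hj with rfl | hj
      · exact le_rfl
      · exact le_of_lt (hpair.1 j hj)
    · rw [List.find?_cons_of_neg hMh] at hfind
      obtain ⟨h1, h2, h3⟩ := ih hpair.2 hfind
      refine ⟨h1, List.mem_cons_of_mem _ h2, ?_⟩
      intro j hj hMj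
      rcases List.mem_cons.mp hj with rfl | hj
      · exact absurd hMj hMh
      · exact h3 j hj hMj

-- insertBy with a transitive asymmetric strict comparison preserves the weak order
theorem insertBy_pairwise_of (lt : String → String → Bool)
    (hasym : ∀ a b, lt a b = true → lt b a = false)
    (htrans : ∀ a b c, lt a b = true → lt b c = true → lt a c = true)
    (x : String) (ys : List String) (h : ys.Pairwise (fun a b => lt b a = false)) :
    (PySem.List.insertBy lt x ys).Pairwise (fun a b => lt b a = false) := by
  induction ys with
  | nil => simp [PySem.List.insertBy]
  | cons y ys ih =>
    rw [List.pairwise_cons] at h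
    by_cases hxy : lt x y = true
    · simp only [PySem.List.insertBy, hxy, if_pos]
      refine List.pairwise_cons.mpr ⟨?_, List.pairwise_cons.mpr h⟩
      intro z hz
      rcases List.mem_cons.mp hz with h' | hz
      · exact h' ▸ hasym x y hxy
      · by_contra hzx
        have hzx' : lt z x = true := by revert hzx; cases hlt : lt z x <;> simp
        have : lt z y = true := htrans z x y hzx' hxy
        rw [h.1 z hz] at this; cases this
    · have hxy' : lt x y = false := by revert hxy; cases hlt : lt x y <;> simp
      simp only [PySem.List.insertBy, hxy']
      rw [if_neg (by simp)]
      refine List.pairwise_cons.mpr ⟨?_, ih h.2⟩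
      intro z hz
      have hz' : z = x ∨ z ∈ ys := by
        have hp := PySem.List.insertBy_perm lt x ys
        have : z ∈ x :: ys := hp.mem_iff.mp hz
        simpa using this
      rcases hz' with rfl | hz'
      · exact hxy'
      · exact h.1 z hz'

theorem pvLt_iff (a b : String) :
    pvLt a b = true ↔ (pvKeyC a < pvKeyC b ∨ (pvKeyC a = pvKeyC b ∧ a < b)) := by
  unfold pvLt
  by_cases h1 : pvKeyC a < pvKeyC b
  · simp [h1]
  · by_cases h2 : pvKeyC b < pvKeyC a
    · simp [h2]; omega
    · have : pvKeyC a = pvKeyC b := by omega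
      simp [this]

theorem pvLt_eq_false_iff (a b : String) :
    pvLt a b = false ↔ ¬ (pvKeyC a < pvKeyC b ∨ (pvKeyC a = pvKeyC b ∧ a < b)) := by
  rw [← pvLt_iff]
  cases h : pvLt a b <;> simp

theorem pvLt_asymm : ∀ a b, pvLt a b = true → pvLt b a = false := by
  intro a b h
  rw [pvLt_iff] at h
  rw [pvLt_eq_false_iff]
  rcases h with h | ⟨h1, h2⟩
  · rintro (h' | ⟨h', _⟩) <;> omega
  · rintro (h' | ⟨_, h'⟩)
    · omega
    · exact absurd h2 (asymm h')

theorem pvLt_trans : ∀ a b c, pvLt a b = true → pvLt b c = true → pvLt a c = true := by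
  intro a b c hab hbc
  rw [pvLt_iff] at hab hbc ⊢
  rcases hab with h1 | ⟨h1, h1'⟩ <;> rcases hbc with h2 | ⟨h2, h2'⟩
  · left; omega
  · left; omega
  · left; omega
  · exact Or.inr ⟨by omega, lt_trans h1' h2'⟩

theorem pvOrdered_pairwise (domains : List String) :
    (pvOrdered domains).Pairwise (fun a b => pvLt b a = false) := by
  have key : ∀ (xs acc : List String),
      acc.Pairwise (fun a b => pvLt b a = false) →
      (List.foldl (fun acc x => PySem.List.insertBy pvLt x acc) acc xs).Pairwise
        (fun a b => pvLt b a = false) := by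
    intro xs
    induction xs with
    | nil => exact fun acc h => h
    | cons x xs ih =>
      exact fun acc h => ih _ (insertBy_pairwise_of pvLt pvLt_asymm pvLt_trans x acc h)
  show (List.foldl (fun acc x => PySem.List.insertBy pvLt x acc) []
      (PySem.Set.ofList domains)).Pairwise _
  exact key _ [] List.Pairwise.nil

theorem pvOrdered_mem (domains : List String) (x : String) :
    x ∈ pvOrdered domains ↔ x ∈ PySem.Set.ofList domains := by
  unfold pvOrdered
  exact (PySem.List.sorted2_perm (PySem.Set.ofList domains)
    (fun item => PySem.Str.count item ".") (fun item => item) false).mem_iff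

-- counting "." counts the '.' characters
theorem pvCountGo (fuel : Nat) : ∀ (l : List Char) (acc : Nat), l.length ≤ fuel →
    PySem.Chars.count.go ['.'] fuel l acc = acc + l.count '.' := by
  induction fuel with
  | zero => intro l acc h; rw [List.length_eq_zero_iff.mp (Nat.le_zero.mp h)]; rfl
  | succ n ih =>
    intro l acc h
    cases l with
    | nil => rfl
    | cons c t =>
      by_cases hc : c = '.'
      · subst hc
        rw [show PySem.Chars.count.go ['.'] (n+1) ('.' :: t) acc
            = PySem.Chars.count.go ['.'] n t (acc + 1) by
          simp [PySem.Chars.count.go, List.isPrefixOf]]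
        rw [ih t (acc + 1) (by simpa using h)]
        simp
        omega
      · rw [show PySem.Chars.count.go ['.'] (n+1) (c :: t) acc
            = PySem.Chars.count.go ['.'] n t acc by
          simp [PySem.Chars.count.go, List.isPrefixOf, Ne.symm hc]]
        rw [ih t acc (by simpa using h)]
        simp [hc]

theorem pvCountDot (s : String) : PySem.Str.count s "." = s.toList.count '.' := by
  rw [PySem.Str.count_eq]
  show PySem.Chars.count s.toList ['.'] = _
  rw [PySem.Chars.count]
  rw [if_neg (by simp)]
  rw [pvCountGo s.toList.length s.toList 0 le_rfl]
  omega

-- dropping past a '.' strictly decreases the '.'-count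
theorem pvCountDropLt (l : List Char) (k : Nat) (h : l[k]? = some '.') :
    (l.drop (k + 1)).count '.' < l.count '.' := by
  have hk : k < l.length := by
    by_contra h'
    rw [List.getElem?_eq_none (by omega)] at h; cases h
  have hdk : l.drop k = l[k] :: l.drop (k + 1) := List.drop_eq_getElem_cons hk
  have hval : l[k] = '.' := by
    have := List.getElem?_eq_getElem hk
    rw [this] at h; exact Option.some.inj h
  have h1 : (l.drop k).count '.' = (l.drop (k + 1)).count '.' + 1 := by
    rw [hdk, List.count_cons, hval]; simp
  have h2 : (l.drop k).count '.' ≤ l.count '.' := (List.drop_sublist k l).count_le '.'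
  omega

theorem pvCountDropDropLt (l : List Char) (k i : Nat) (hki : k < i)
    (h : l[i]? = some '.') :
    (l.drop (i + 1)).count '.' < (l.drop (k + 1)).count '.' := by
  have h1 : (l.drop (k + 1))[i - (k + 1)]? = some '.' := by
    rw [List.getElem?_drop]; rwa [show k + 1 + (i - (k + 1)) = i by omega]
  have := pvCountDropLt (l.drop (k + 1)) (i - (k + 1)) h1
  rw [List.drop_drop] at this
  rwa [show k + 1 + (i - (k + 1) + 1) = i + 1 by omega] at this

-- domain.endswith("." + p) iff p is the suffix after some '.' of domain
theorem pvEndswithIff (d p : String) :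
    PySem.Str.endswith d ("." ++ p) = true ↔
    ∃ k : Nat, d.toList[k]? = some '.' ∧ p.toList = d.toList.drop (k + 1) := by
  rw [PySem.Str.endswith_eq]
  rw [show ("." ++ p).toList = '.' :: p.toList by simp]
  rw [PySem.Chars.endswith_iff]
  constructor
  · rintro ⟨u, hu⟩
    refine ⟨u.length, ?_, ?_⟩
    · rw [← hu, List.getElem?_append_right le_rfl]; simp
    · rw [← hu, List.drop_append]
      simp
  · rintro ⟨k, hk, hp⟩
    have hklt : k < d.toList.length := by
      by_contra h'
      rw [List.getElem?_eq_none (by omega)] at hk; cases hk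
    refine ⟨d.toList.take k, ?_⟩
    have hval : d.toList[k] = '.' := by
      have := List.getElem?_eq_getElem hklt
      rw [this] at hk; exact Option.some.inj hk
    rw [hp, ← hval, ← List.drop_eq_getElem_cons hklt, List.take_append_drop]

-- the slice d[i+1:] as a character list (0 ≤ i)
theorem pvSliceToList (d : String) (i : Int) (hi : 0 ≤ i) :
    (PySem.Str.slice d (some (i + 1)) none).toList = d.toList.drop (i.toNat + 1) := by
  rw [PySem.Str.toList_slice, PySem.Chars.slice_eq_listSlice,
    PySem.List.slice_from _ (by omega)]
  congr 1
  omega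

-- the raw indexing primitive on a nonnegative index
theorem pvGetNonneg (d : String) (i : Int) (hi : 0 ≤ i) :
    PySem.Str.pyGet? d i = d.toList[i.toNat]? := by
  obtain ⟨n, rfl⟩ : ∃ n : Nat, i = (n : Int) := ⟨i.toNat, by omega⟩
  simp

-- membership in the registered set
theorem pvContainsIff (S : List String) (x : String) :
    PySem.Set.contains S x = true ↔ x ∈ S := by
  simp [PySem.Set.contains]

-- the descending index range is pairwise decreasing
theorem pvRangeDescPairwise (n : Int) :
    (PySem.List.pyRange (n - 1) (-1) (-1)).Pairwise (fun a b => b < a) := by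
  rw [PySem.List.pyRange_neg_one_eq_reverse, List.pairwise_reverse]
  simpa using PySem.List.pairwise_lt_pyRange_one (-1 + 1) (n - 1 + 1)

theorem pvMemRangeDesc (d : String) (i : Int) :
    i ∈ PySem.List.pyRange (PySem.Str.len d - 1) (-1) (-1) ↔
      0 ≤ i ∧ i < (d.toList.length : Int) := by
  rw [PySem.List.mem_pyRange_neg_one, PySem.Str.len_eq]
  omega

-- elements of pvOrdered that sort strictly before d sit in the prefix before d
theorem pvMemPrefix (domains : List String) (P Q : List String) (d x : String)
    (hL : pvOrdered domains = P ++ d :: Q) (hx : x ∈ pvOrdered domains)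
    (hlt : pvLt x d = true) : x ∈ P := by
  have hpair := pvOrdered_pairwise domains
  rw [hL] at hpair hx
  rcases List.mem_append.mp hx with h | h
  · exact h
  · exfalso
    rcases List.mem_cons.mp h with rfl | h
    · rw [pvLt_asymm _ _ hlt] at hlt; cases hlt
    · have := (List.pairwise_append.mp hpair).2.1
      rw [List.pairwise_cons] at this
      rw [this.1 x h] at hlt; cases hlt

-- the per-domain step: A's first matching parent = B's right-to-left dot scan
theorem pvStepEq (domains : List String) (P Q : List String) (d : String)
    (hL : pvOrdered domains = P ++ d :: Q) :
    pvFirstParent d P =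
      pvScan (PySem.Set.ofList domains) d
        (PySem.List.pyRange (PySem.Str.len d - 1) (-1) (-1)) := by
  rw [pvFirstParent_eq_find?, pvScan_eq_find?]
  have hC : ∀ i : Int, 0 ≤ i →
      ((PySem.Str.pyGet? d i == some '.'
          && PySem.Set.contains (PySem.Set.ofList domains)
            (PySem.Str.slice d (some (i + 1)) none)) = true ↔
        d.toList[i.toNat]? = some '.' ∧
          PySem.Str.slice d (some (i + 1)) none ∈ PySem.Set.ofList domains) := by
    intro i hi
    rw [Bool.and_eq_true, beq_iff_eq, pvGetNonneg d i hi, pvContainsIff]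
  have hPmemS : ∀ p ∈ P, p ∈ PySem.Set.ofList domains := by
    intro p hp
    rw [← pvOrdered_mem, hL]
    exact List.mem_append.mpr (Or.inl hp)
  cases hfind : List.find? (fun i => PySem.Str.pyGet? d i == some '.'
      && PySem.Set.contains (PySem.Set.ofList domains)
        (PySem.Str.slice d (some (i + 1)) none))
      (PySem.List.pyRange (PySem.Str.len d - 1) (-1) (-1)) with
  | none =>
    have hnone := List.find?_eq_none.mp hfind
    rw [Option.map_none]
    rw [List.find?_eq_none]
    intro p hp hgood
    obtain ⟨k, hk, hpk⟩ := (pvEndswithIff d p).mp hgood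
    have hkl : k < d.toList.length := by
      by_contra h'
      rw [List.getElem?_eq_none (by omega)] at hk; cases hk
    refine hnone (k : Int) ((pvMemRangeDesc d _).mpr ⟨by omega, by exact_mod_cast hkl⟩) ?_
    show (PySem.Str.pyGet? d (k : Int) == some '.'
      && PySem.Set.contains (PySem.Set.ofList domains)
        (PySem.Str.slice d (some ((k : Int) + 1)) none)) = true
    rw [hC (k : Int) (by omega)]
    refine ⟨by simpa using hk, ?_⟩
    have : PySem.Str.slice d (some ((k : Int) + 1)) none = p := by
      rw [← String.toList_inj, pvSliceToList d _ (by omega), hpk]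
      simp
    rw [this]
    exact hPmemS p hp
  | some i =>
    obtain ⟨hCi, hiR, hmax⟩ := find?_some_desc _ _
      (pvRangeDescPairwise (PySem.Str.len d)) i hfind
    have hi0 : 0 ≤ i ∧ i < (d.toList.length : Int) := (pvMemRangeDesc d i).mp hiR
    obtain ⟨hdot, hmemS⟩ := (hC i hi0.1).mp hCi
    rw [Option.map_some]
    set cand := PySem.Str.slice d (some (i + 1)) none with hcand
    have hcandToList : cand.toList = d.toList.drop (i.toNat + 1) :=
      pvSliceToList d i hi0.1
    have hcandCount : pvKeyC cand < pvKeyC d := by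
      rw [pvKeyC, pvKeyC, pvCountDot, pvCountDot, hcandToList]
      exact pvCountDropLt d.toList i.toNat hdot
    have hcandP : cand ∈ P := by
      refine pvMemPrefix domains P Q d cand hL ?_ ?_
      · rw [pvOrdered_mem]; exact hmemS
      · rw [pvLt_iff]; exact Or.inl hcandCount
    have hGood : PySem.Str.endswith d ("." ++ cand) = true := by
      rw [pvEndswithIff]
      exact ⟨i.toNat, hdot, hcandToList⟩
    refine find?_eq_some_of_pairwise (fun a b => pvLt b a = false) _ P
      ?_ cand hcandP hGood ?_
    · have := pvOrdered_pairwise domains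
      rw [hL] at this
      exact (List.pairwise_append.mp this).1
    · intro p hp hgood hne
      obtain ⟨k, hk, hpk⟩ := (pvEndswithIff d p).mp hgood
      have hkl : k < d.toList.length := by
        by_contra h'
        rw [List.getElem?_eq_none (by omega)] at hk; cases hk
      have hpslice : PySem.Str.slice d (some ((k : Int) + 1)) none = p := by
        rw [← String.toList_inj, pvSliceToList d _ (by omega), hpk]
        simp
      have hkR : (k : Int) ∈ PySem.List.pyRange (PySem.Str.len d - 1) (-1) (-1) :=
        (pvMemRangeDesc d _).mpr ⟨by omega, by exact_mod_cast hkl⟩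
      have hCk : (PySem.Str.pyGet? d (k : Int) == some '.'
          && PySem.Set.contains (PySem.Set.ofList domains)
            (PySem.Str.slice d (some ((k : Int) + 1)) none)) = true := by
        rw [hC (k : Int) (by omega)]
        refine ⟨by simpa using hk, ?_⟩
        rw [hpslice]
        exact hPmemS p hp
      have hki : (k : Int) ≤ i := hmax (k : Int) hkR hCk
      have hkne : k ≠ i.toNat := by
        intro heq
        apply hne
        rw [← hpslice, hcand, heq,
          show ((i.toNat : Nat) : Int) = i from by omega]
      have hklt : k < i.toNat := by omega
      have : pvKeyC cand < pvKeyC p := by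
        rw [pvKeyC, pvKeyC, pvCountDot, pvCountDot, hcandToList, hpk]
        exact pvCountDropDropLt d.toList k i.toNat hklt hdot
      intro hfalse
      rw [pvLt_eq_false_iff] at hfalse
      exact hfalse (Or.inl this)

-- the outer loops agree step by step
theorem pvLoopEq (domains : List String) :
    ∀ (T P : List String) (conf : List (String × String)),
      pvOrdered domains = P ++ T →
      (T.foldl (fun (st : List (String × String) × List String) domain =>
          match pvFirstParent domain st.2 with
          | some p => (st.1 ++ [(p, domain)], st.2 ++ [domain])
          | none => (st.1, st.2 ++ [domain])) (conf, P)).1 =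
      T.foldl (fun conflicts domain =>
          match pvScan (PySem.Set.ofList domains) domain
              (PySem.List.pyRange (PySem.Str.len domain - 1) (-1) (-1)) with
          | some cand => conflicts ++ [(cand, domain)]
          | none => conflicts) conf := by
  intro T
  induction T with
  | nil => intro P conf _; rfl
  | cons d T' ih =>
    intro P conf hL
    simp only [List.foldl_cons]
    rw [pvStepEq domains P T' d hL]
    cases hscan : pvScan (PySem.Set.ofList domains) d
        (PySem.List.pyRange (PySem.Str.len d - 1) (-1) (-1)) with
    | none => exact ih (P ++ [d]) conf (by rw [hL]; simp)
    | some cand => exact ih (P ++ [d]) (conf ++ [(cand, d)]) (by rw [hL]; simp)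

-- ===== VERDICT (by name: the statement is the Claim_ definition above) =====
theorem find_parent_conflicts_spec : Claim_equal_find_parent_conflicts := by
  intro domains _
  show find_parent_conflicts domains = find_parent_conflicts_alt domains
  exact pvLoopEq domains (pvOrdered domains) [] [] rfl
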